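-- pv_equiv track=rewrite | github.com/heswithme/curve-sim-cpp | python/arb_sim/trade_data/process_series.py | cut_rows
-- ===== SOURCE A (Python) =====
-- from typing import Optional, Iterable, Tuple, List
--
-- def cut_rows(rows: list, t0: Optional[int], t1: Optional[int]) -> list:
--     if t0 is None and t1 is None:
--         return rows
--     out = []
--     for r in rows:
--         ts = int(r[0])
--         if (t0 is not None and ts < t0) or (t1 is not None and ts > t1):
--             continue
--         out.append(r)
--     return out
-- ===== SOURCE B (Python) =====
-- def cut_rows(rows: list, t0, t1) -> list:
--     if t0 is None and t1 is None:
--         return rows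
--     n = len(rows)
--     # rows are assumed sorted ascending by timestamp rows[i][0];
--     # lo = first index with ts >= t0, hi = first index with ts > t1 (binary search).
--     if t0 is None:
--         lo = 0
--     else:
--         a, b = 0, n
--         while a < b:
--             m = (a + b) // 2
--             if int(rows[m][0]) < t0:
--                 a = m + 1
--             else:
--                 b = m
--         lo = a
--     if t1 is None:
--         hi = n
--     else:
--         a, b = 0, n
--         while a < b:
--             m = (a + b) // 2
--             if int(rows[m][0]) <= t1:
--                 a = m + 1
--             else:
--                 b = m
--         hi = a
--     return rows[lo:hi]
-- ===== Notes on version B (the rewrite author's own statement) =====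
-- stated objective: alternative
-- what changed: Replaces the linear filter pass by two binary searches for the range boundaries followed by a slice, relying on rows being sorted ascending by timestamp (the natural shape of this time-series data); Pre_ states that sortedness.
-- outside the precondition, e.g. on cut_rows([[3], [1]], 2, None): A returns [[3]], B returns []
import Mathlib
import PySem

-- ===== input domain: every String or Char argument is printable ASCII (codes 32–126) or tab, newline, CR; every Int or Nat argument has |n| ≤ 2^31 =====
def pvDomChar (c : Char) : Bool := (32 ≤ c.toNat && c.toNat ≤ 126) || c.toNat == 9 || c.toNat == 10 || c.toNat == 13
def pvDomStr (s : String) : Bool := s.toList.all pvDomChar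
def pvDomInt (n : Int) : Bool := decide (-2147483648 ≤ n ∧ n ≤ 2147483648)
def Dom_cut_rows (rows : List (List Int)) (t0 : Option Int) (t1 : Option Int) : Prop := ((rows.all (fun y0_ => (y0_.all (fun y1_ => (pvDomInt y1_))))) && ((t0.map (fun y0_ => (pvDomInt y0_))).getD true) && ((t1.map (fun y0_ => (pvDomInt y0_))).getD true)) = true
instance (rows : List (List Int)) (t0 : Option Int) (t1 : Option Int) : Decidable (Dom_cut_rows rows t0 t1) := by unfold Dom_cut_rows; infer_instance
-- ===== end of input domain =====

-- B replaces A's linear filter by two binary searches + slice; Pre_ requires rows sorted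
-- ascending by timestamp (and nonempty rows, where A would raise IndexError).


-- timestamp of a row: int(r[0]); the getD 0 default is only reachable on empty rows,
-- which Pre_ excludes (Python raises IndexError there).
def rowKey (r : List Int) : Int := (PySem.List.pyGet? r 0).getD 0

-- ===== PORT A =====
def cut_rows (rows : List (List Int)) (t0 : Option Int) (t1 : Option Int) : List (List Int) :=
  if t0 = none ∧ t1 = none then rows
  else
    rows.foldl (fun out r =>
      let ts := rowKey r
      if (t0.any (fun a => ts < a)) || (t1.any (fun b => b < ts)) then out
      else out ++ [r]) []

-- ===== PORT B =====
-- the 'while a < b' binary-search loop of Source B; keyLt m = the loop's comparison at index m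
def bisect (rows : List (List Int)) (keyLt : Int → Bool) (a b : Nat) : Nat :=
  if _h : a < b then
    let m := (a + b) / 2
    if keyLt (rowKey (rows.getD m [])) then bisect rows keyLt (m + 1) b
    else bisect rows keyLt a m
  else a
termination_by b - a
decreasing_by all_goals omega

def cut_rows_alt (rows : List (List Int)) (t0 : Option Int) (t1 : Option Int) : List (List Int) :=
  if t0 = none ∧ t1 = none then rows
  else
    let n := rows.length
    let lo := match t0 with
      | none => 0
      | some a => bisect rows (fun k => decide (k < a)) 0 n
    let hi := match t1 with
      | none => n
      | some b => bisect rows (fun k => decide (k ≤ b)) 0 n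
    (rows.drop lo).take (hi - lo)   -- rows[lo:hi], 0 ≤ lo, hi ≤ n

-- ===== PRECONDITION & SPEC =====
-- Pre_ excludes (a) empty rows while a bound is set (Python A raises IndexError on r[0]) and
-- (b) rows not sorted ascending by timestamp, where B's binary search is not applicable
-- although A still returns a value (see claim cites).
def Pre_cut_rows (rows : List (List Int)) (t0 : Option Int) (t1 : Option Int) : Prop :=
  (t0 = none ∧ t1 = none) ∨
    ((∀ r ∈ rows, r ≠ []) ∧ rows.Pairwise (fun r s => rowKey r ≤ rowKey s))
instance (rows : List (List Int)) (t0 : Option Int) (t1 : Option Int) : Decidable (Pre_cut_rows rows t0 t1) := by unfold Pre_cut_rows; infer_instance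

def pvWitness_cut_rows : List (List Int) × Option Int × Option Int := ([[1, 10], [3, 20], [5, 30]], some 2, some 4)

def Spec_cut_rows (rows : List (List Int)) (t0 : Option Int) (t1 : Option Int) (out : List (List Int)) : Prop := out = cut_rows_alt rows t0 t1
instance (rows : List (List Int)) (t0 : Option Int) (t1 : Option Int) (out : List (List Int)) : Decidable (Spec_cut_rows rows t0 t1 out) := by unfold Spec_cut_rows; infer_instance

-- ===== CLAIM (what is proved, stated in full; the proofs are below) =====
def Claim_equal_cut_rows : Prop := ∀ (rows : List (List Int)) (t0 : Option Int) (t1 : Option Int), Dom_cut_rows rows t0 t1 → Pre_cut_rows rows t0 t1 → Spec_cut_rows rows t0 t1 (cut_rows rows t0 t1)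

-- ===== LEMMAS AND PROOFS =====

-- binary-search loop invariant: if the tested condition is downward closed on [a,b),
-- the loop returns the boundary r with the condition true on [a,r) and false on [r,b)
theorem bisect_spec (rows : List (List Int)) (keyLt : Int → Bool)
    (f : Nat → Bool) (hf : ∀ m, f m = keyLt (rowKey (rows.getD m [])))
    (a b : Nat) (hab : a ≤ b)
    (hdc : ∀ i j, a ≤ i → i ≤ j → j < b → f j = true → f i = true) :
    a ≤ bisect rows keyLt a b ∧ bisect rows keyLt a b ≤ b ∧
      (∀ i, a ≤ i → i < bisect rows keyLt a b → f i = true) ∧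
      (∀ i, bisect rows keyLt a b ≤ i → i < b → f i = false) := by
  induction a, b using bisect.induct rows keyLt with
  | case1 a b h m hm ih =>
    have hmm : m = (a + b) / 2 := rfl
    rw [bisect, dif_pos h]
    simp only [← hmm, hm, if_true]
    obtain ⟨h1, h2, h3, h4⟩ :=
      ih (by omega) (fun i j hi hij hj => hdc i j (by omega) hij hj)
    refine ⟨by omega, h2, ?_, h4⟩
    intro i hi hilt
    by_cases hc : i ≤ m
    · exact hdc i m hi hc (by omega) (by rw [hf]; exact hm)
    · exact h3 i (by omega) hilt
  | case2 a b h m hm ih =>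
    have hmm : m = (a + b) / 2 := rfl
    have hmb : keyLt (rowKey (rows.getD m [])) = false := by
      simpa using hm
    rw [bisect, dif_pos h]
    simp only [← hmm, hmb, if_false, Bool.false_eq_true]
    obtain ⟨h1, h2, h3, h4⟩ :=
      ih (by omega) (fun i j hi hij hj => hdc i j hi hij (by omega))
    refine ⟨h1, by omega, h3, ?_⟩
    intro i hri hib
    by_cases hc : i < m
    · exact h4 i hri hc
    · cases hfi : f i with
      | false => rfl
      | true =>
        have := hdc m i (by omega) (by omega) hib hfi
        rw [hf] at this
        rw [this] at hmb
        exact absurd hmb (by simp)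
  | case3 a b h =>
    rw [bisect, dif_neg h]
    exact ⟨le_refl a, hab, fun i hi hlt => by omega, fun i hi hlt => by omega⟩

theorem cut_rows_keep_iff (t0 t1 : Option Int) (ts : Int) :
    (!((t0.any (fun a => ts < a)) || (t1.any (fun b => b < ts))))
      = ((t0.all (fun a => a ≤ ts)) && (t1.all (fun b => ts ≤ b))) := by
  cases t0 <;> cases t1 <;>
    simp only [Option.any, Option.all, Bool.not_or, ← decide_not, Bool.and_eq_true,
      decide_eq_decide, decide_eq_true_eq, not_lt, Bool.not_false, Bool.not_true,
      Bool.true_and, Bool.and_true] <;> omega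

-- filtering by a predicate that holds exactly on an index interval is a slice
theorem filter_index_interval {α : Type} (p : α → Bool) :
    ∀ (xs : List α) (lo hi : Nat),
    (∀ i (h : i < xs.length), p xs[i] = decide (lo ≤ i ∧ i < hi)) →
    xs.filter p = (xs.take hi).drop lo := by
  intro xs
  induction xs with
  | nil => intro lo hi _; simp
  | cons x t ih =>
    intro lo hi hp
    have hx := hp 0 (by simp)
    cases lo with
    | zero =>
      cases hi with
      | zero =>
        simp only [List.take_zero, List.drop_nil]
        have : p x = false := by simpa using hx
        rw [List.filter_cons_of_neg (by simp [this])]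
        exact ih 0 0 (fun i h => by simpa using hp (i+1) (by simpa using Nat.succ_lt_succ h))
      | succ h' =>
        have : p x = true := by simpa using hx
        rw [List.filter_cons_of_pos this]
        simp only [List.take_succ_cons, List.drop_zero]
        rw [ih 0 h' (fun i hh => by
          have := hp (i+1) (by simpa using Nat.succ_lt_succ hh)
          simpa [Nat.succ_lt_succ_iff] using this)]
        simp
    | succ l =>
      have : p x = false := by simpa using hx
      rw [List.filter_cons_of_neg (by simp [this])]
      rw [ih l (hi - 1) (fun i hh => by
        have := hp (i+1) (by simpa using Nat.succ_lt_succ hh)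
        simp only [List.getElem_cons_succ] at this
        rw [this]
        simp only [decide_eq_decide]
        omega)]
      cases hi with
      | zero => simp
      | succ h' => simp [Nat.succ_sub_one]

-- sorted rows: pairwise keys, index form
theorem bisect_lo (rows : List (List Int)) (a : Int)
    (hsort : ∀ i j (hi : i < rows.length) (hj : j < rows.length), i < j →
      rowKey rows[i] ≤ rowKey rows[j]) :
    bisect rows (fun k => decide (k < a)) 0 rows.length ≤ rows.length ∧
      (∀ i (h : i < rows.length),
        decide (a ≤ rowKey rows[i])
          = decide (bisect rows (fun k => decide (k < a)) 0 rows.length ≤ i)) := by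
  have hkey : ∀ i (h : i < rows.length), rows.getD i [] = rows[i] := by
    intro i h
    simp [List.getD_eq_getElem?_getD, List.getElem?_eq_getElem h]
  obtain ⟨h1, h2, h3, h4⟩ := bisect_spec rows (fun k => decide (k < a))
    (fun m => decide (rowKey (rows.getD m []) < a)) (fun m => rfl)
    0 rows.length (Nat.zero_le _)
    (fun i j hi0 hij hjn hj => by
      simp only [decide_eq_true_eq] at hj ⊢
      rw [hkey j hjn] at hj
      rw [hkey i (by omega)]
      rcases Nat.lt_or_ge i j with hc | hc
      · have := hsort i j (by omega) hjn hc; omega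
      · have : i = j := by omega
        subst this; omega)
  refine ⟨h2, ?_⟩
  intro i h
  by_cases hc : bisect rows (fun k => decide (k < a)) 0 rows.length ≤ i
  · have := h4 i hc h
    rw [hkey i h] at this
    simp only [decide_eq_false_iff_not, not_lt] at this
    simp [hc, this]
  · have := h3 i (by omega) (by omega)
    rw [hkey i h] at this
    simp only [decide_eq_true_eq] at this
    simp [hc]; omega

theorem bisect_hi (rows : List (List Int)) (b : Int)
    (hsort : ∀ i j (hi : i < rows.length) (hj : j < rows.length), i < j →
      rowKey rows[i] ≤ rowKey rows[j]) :
    bisect rows (fun k => decide (k ≤ b)) 0 rows.length ≤ rows.length ∧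
      (∀ i (h : i < rows.length),
        decide (rowKey rows[i] ≤ b)
          = decide (i < bisect rows (fun k => decide (k ≤ b)) 0 rows.length)) := by
  have hkey : ∀ i (h : i < rows.length), rows.getD i [] = rows[i] := by
    intro i h
    simp [List.getD_eq_getElem?_getD, List.getElem?_eq_getElem h]
  obtain ⟨h1, h2, h3, h4⟩ := bisect_spec rows (fun k => decide (k ≤ b))
    (fun m => decide (rowKey (rows.getD m []) ≤ b)) (fun m => rfl)
    0 rows.length (Nat.zero_le _)
    (fun i j hi0 hij hjn hj => by
      simp only [decide_eq_true_eq] at hj ⊢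
      rw [hkey j hjn] at hj
      rw [hkey i (by omega)]
      rcases Nat.lt_or_ge i j with hc | hc
      · have := hsort i j (by omega) hjn hc; omega
      · have : i = j := by omega
        subst this; omega)
  refine ⟨h2, ?_⟩
  intro i h
  by_cases hc : i < bisect rows (fun k => decide (k ≤ b)) 0 rows.length
  · have := h3 i (by omega) hc
    rw [hkey i h] at this
    simp only [decide_eq_true_eq] at this
    simp [hc, this]
  · have := h4 i (by omega) h
    rw [hkey i h] at this
    simp only [decide_eq_false_iff_not, not_le] at this
    simp [hc]; omega

-- A's foldl is a filter over the keep-predicate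
theorem cut_rows_foldl_filter (rows : List (List Int)) (t0 t1 : Option Int) :
    rows.foldl (fun out r =>
        let ts := rowKey r
        if (t0.any (fun a => ts < a)) || (t1.any (fun b => b < ts)) then out
        else out ++ [r]) []
      = rows.filter (fun r =>
          (t0.all (fun a => a ≤ rowKey r)) && (t1.all (fun b => rowKey r ≤ b))) := by
  have hf : (fun (out : List (List Int)) (r : List Int) =>
      let ts := rowKey r
      if (t0.any (fun a => ts < a)) || (t1.any (fun b => b < ts)) then out
      else out ++ [r])
    = (fun out r =>
      if ((t0.all (fun a => a ≤ rowKey r)) && (t1.all (fun b => rowKey r ≤ b)))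
      then out ++ [r] else out) := by
    funext out r
    rw [← cut_rows_keep_iff t0 t1 (rowKey r)]
    simp only []
    cases hc : ((t0.any (fun a => rowKey r < a)) || (t1.any (fun b => b < rowKey r))) <;>
      simp [hc]
  rw [hf, PySem.List.foldl_append_if_eq_filter]
  simp

-- the kept rows are exactly the index interval [lo, hi), hence a slice
theorem filter_eq_slice (rows : List (List Int)) (t0 t1 : Option Int) (lo hi : Nat)
    (hlo : ∀ i (h : i < rows.length),
      (t0.all (fun a => a ≤ rowKey rows[i])) = decide (lo ≤ i))
    (hhi : ∀ i (h : i < rows.length),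
      (t1.all (fun b => rowKey rows[i] ≤ b)) = decide (i < hi)) :
    rows.filter (fun r =>
        (t0.all (fun a => a ≤ rowKey r)) && (t1.all (fun b => rowKey r ≤ b)))
      = (rows.drop lo).take (hi - lo) := by
  rw [filter_index_interval _ rows lo hi (fun i h => by
    rw [hlo i h, hhi i h]
    simp)]
  rw [List.drop_take]

-- ===== VERDICT (by name: the statement is the Claim_ definition above) =====
theorem cut_rows_spec : Claim_equal_cut_rows := by
  intro rows t0 t1 _ hpre
  unfold Spec_cut_rows cut_rows cut_rows_alt
  split
  · rfl
  · rename_i hnn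
    have hpair : rows.Pairwise (fun r s => rowKey r ≤ rowKey s) := by
      rcases hpre with h | h
      · exact absurd h hnn
      · exact h.2
    have hsort : ∀ i j (hi : i < rows.length) (hj : j < rows.length), i < j →
        rowKey rows[i] ≤ rowKey rows[j] := by
      rw [List.pairwise_iff_getElem] at hpair
      exact fun i j hi hj hij => hpair i j hi hj hij
    rw [cut_rows_foldl_filter]
    cases t0 with
    | none =>
      cases t1 with
      | none => exact absurd ⟨rfl, rfl⟩ hnn
      | some b =>
        obtain ⟨hb1, hb2⟩ := bisect_hi rows b hsort
        show _ = (rows.drop 0).take (bisect rows (fun k => decide (k ≤ b)) 0 rows.length - 0)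
        exact filter_eq_slice rows none (some b) 0 _
          (fun i h => by simp) (fun i h => by simpa using hb2 i h)
    | some a =>
      cases t1 with
      | none =>
        obtain ⟨ha1, ha2⟩ := bisect_lo rows a hsort
        show _ = (rows.drop (bisect rows (fun k => decide (k < a)) 0 rows.length)).take
          (rows.length - bisect rows (fun k => decide (k < a)) 0 rows.length)
        exact filter_eq_slice rows (some a) none _ rows.length
          (fun i h => by simpa using ha2 i h) (fun i h => by simp; omega)
      | some b =>
        obtain ⟨ha1, ha2⟩ := bisect_lo rows a hsort
        obtain ⟨hb1, hb2⟩ := bisect_hi rows b hsort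
        show _ = (rows.drop (bisect rows (fun k => decide (k < a)) 0 rows.length)).take
          (bisect rows (fun k => decide (k ≤ b)) 0 rows.length -
            bisect rows (fun k => decide (k < a)) 0 rows.length)
        exact filter_eq_slice rows (some a) (some b) _ _
          (fun i h => by simpa using ha2 i h) (fun i h => by simpa using hb2 i h)
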